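-- pv_equiv track=rewrite | github.com/Hugoake/extensions-of-barcodes | ext_barcodes_iterator.py | antichains
-- ===== SOURCE A (Python) =====
-- from copy import copy
--
-- def death(bar):
--   return bar[1]
--
-- def antichains(sorted_list):
--   if len(sorted_list) == 0 :
--     yield []
--   else:
--     sorted_list_without_maximum = copy(sorted_list)
--     maximum = sorted_list_without_maximum.pop()
--     acs_without_maximum = antichains(sorted_list_without_maximum)
--     for ac in acs_without_maximum:
--       yield ac
--       ac_and_maximum_form_antichain = len(ac) == 0 or death(maximum) < death(ac[-1])
--       if ac_and_maximum_form_antichain: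
--         yield ac+[maximum]
-- ===== SOURCE B (Python) =====
-- def antichains(sorted_list):
--     acs = [[]]
--     for x in sorted_list:
--         nxt = []
--         for ac in acs:
--             nxt.append(ac)
--             if len(ac) == 0 or ac[-1][1] > x[1]:
--                 nxt.append(ac + [x])
--         acs = nxt
--     yield from acs
-- ===== Notes on version B (the rewrite author's own statement) =====
-- stated objective: simpler
-- what changed: Replaces the recursion that pops the last element and re-enumerates the prefix with an iterative bottom-up build: one forward pass keeps the current list of antichains and extends each with the next bar when it still forms an antichain.
import Mathlib
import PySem

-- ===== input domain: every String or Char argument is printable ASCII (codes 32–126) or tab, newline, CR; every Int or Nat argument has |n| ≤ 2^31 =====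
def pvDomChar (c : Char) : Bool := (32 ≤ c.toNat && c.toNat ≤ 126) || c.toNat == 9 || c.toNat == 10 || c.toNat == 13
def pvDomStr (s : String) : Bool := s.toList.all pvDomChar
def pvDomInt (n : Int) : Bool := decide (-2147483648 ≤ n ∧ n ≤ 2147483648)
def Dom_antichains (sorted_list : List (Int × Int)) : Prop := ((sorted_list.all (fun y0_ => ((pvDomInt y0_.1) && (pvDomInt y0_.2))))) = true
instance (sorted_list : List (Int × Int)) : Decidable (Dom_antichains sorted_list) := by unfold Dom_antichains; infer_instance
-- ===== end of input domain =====

-- B replaces A's pop-last recursion with an iterative forward fold over the bars (same output, simpler decomposition).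


-- ===== PORT A =====
-- death(bar) = bar[1]
def death (bar : Int × Int) : Int := bar.2

-- recursion: pop the maximum (last element), enumerate antichains of the rest,
-- and for each yield it and, when it still forms an antichain, it plus the maximum
def antichains (sorted_list : List (Int × Int)) : List (List (Int × Int)) :=
  if h : sorted_list.length = 0 then [[]]
  else
    let maximum := sorted_list.getLast (by intro he; simp [he] at h)
    let sorted_list_without_maximum := sorted_list.dropLast
    (antichains sorted_list_without_maximum).flatMap (fun ac =>
      if ac.length = 0 ∨ death maximum < death (ac.getLastD (0, 0)) then
        [ac, ac ++ [maximum]]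
      else [ac])
termination_by sorted_list.length
decreasing_by simp [List.length_dropLast]; omega

-- ===== PORT B =====
-- one generation step: each antichain, followed (when the test passes) by its extension with x
def altStep (acs : List (List (Int × Int))) (x : Int × Int) : List (List (Int × Int)) :=
  acs.flatMap (fun ac =>
    [ac] ++ (if ac = [] ∨ x.2 < (ac.getLastD (0, 0)).2 then [ac ++ [x]] else []))

def antichains_alt (sorted_list : List (Int × Int)) : List (List (Int × Int)) :=
  sorted_list.foldl altStep [[]]

-- ===== PRECONDITION & SPEC =====
def Spec_antichains (sorted_list : List (Int × Int)) (out : List (List (Int × Int))) : Prop := out = antichains_alt sorted_list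
instance (sorted_list : List (Int × Int)) (out : List (List (Int × Int))) : Decidable (Spec_antichains sorted_list out) := by unfold Spec_antichains; infer_instance

-- ===== CLAIM (what is proved, stated in full; the proofs are below) =====
def Claim_equal_antichains : Prop := ∀ (sorted_list : List (Int × Int)), Dom_antichains sorted_list → Spec_antichains sorted_list (antichains sorted_list)

-- ===== LEMMAS AND PROOFS =====

-- A's per-element expansion coincides with B's generation step
lemma step_eq (acs : List (List (Int × Int))) (m : Int × Int) :
    acs.flatMap (fun ac =>
      if ac.length = 0 ∨ death m < death (ac.getLastD (0, 0)) then
        [ac, ac ++ [m]]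
      else [ac]) = altStep acs m := by
  unfold altStep
  refine List.flatMap_congr ?_
  intro ac _
  simp only [death, List.length_eq_zero_iff]
  split_ifs with h <;> simp

lemma antichains_eq_alt (l : List (Int × Int)) : antichains l = antichains_alt l := by
  induction l using List.reverseRecOn with
  | nil => simp [antichains, antichains_alt]
  | append_singleton l m ih =>
    rw [antichains]
    have hne : ¬ (l ++ [m]).length = 0 := by simp
    simp only [hne, dite_false, List.dropLast_concat, List.getLast_concat]
    rw [step_eq, ih]
    unfold antichains_alt
    rw [List.foldl_append]
    rfl

-- ===== VERDICT (by name: the statement is the Claim_ definition above) =====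
theorem antichains_spec : Claim_equal_antichains := by
  intro l _
  unfold Spec_antichains
  exact antichains_eq_alt l
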